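-- pv_equiv track=rewrite | github.com/SeungjipLee/Algorithm | 이승집/24.07/240703/Pro_Lv1.모의고사.py | solution
-- ===== SOURCE A (Python) =====
-- def solution(answers):
--     first = second = third = 0
--
--     for i in range(1, len(answers) + 1):
--         if i % 5 == (answers[i - 1]) % 5:
--             first += 1
--         if i % 2 and answers[i - 1] == 2:
--             second += 1
--         elif i % 2 == 0:
--             if (i // 2) % 4 == 1 and answers[i - 1] == 1:
--                 second += 1
--             elif (i // 2) % 4 == 2 and answers[i - 1] == 3:
--                 second += 1
--             elif (i // 2) % 4 == 3 and answers[i - 1] == 4: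
--                 second += 1
--             elif (i // 2) % 4 == 0 and answers[i - 1] == 5:
--                 second += 1
--
--         if (i % 10 == 1 or i % 10 == 2) and answers[i - 1] == 3:
--             third += 1
--         elif (i % 10 == 3 or i % 10 == 4) and answers[i - 1] == 1:
--             third += 1
--         elif (i % 10 == 5 or i % 10 == 6) and answers[i - 1] == 2:
--             third += 1
--         elif (i % 10 == 7 or i % 10 == 8) and answers[i - 1] == 4:
--             third += 1
--         elif (i % 10 == 9 or i % 10 == 0) and answers[i - 1] == 5:
--             third += 1
--
--     li = [(first, 1), (second, 2), (third, 3)]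
--     maximum = max(li)[0]
--     answer = [i[1] for i in li if i[0] == maximum]
--
--     return answer
-- ===== SOURCE B (Python) =====
-- P2 = [2, 1, 2, 3, 2, 4, 2, 5]
-- P3 = [3, 3, 1, 1, 2, 2, 4, 4, 5, 5]
--
-- def solution(answers):
--     # Stage 1: aggregate the input into a histogram keyed by (position mod 40, answer);
--     # 40 = lcm(5, 8, 10), so every taker's verdict depends only on that key.
--     hist = {}
--     for k, a in enumerate(answers):
--         key = (k % 40, a)
--         hist[key] = hist.get(key, 0) + 1
--     # Stage 2: score each distinct key once, weighted by its multiplicity.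
--     first = second = third = 0
--     for (r, a), c in hist.items():
--         if (r + 1) % 5 == a % 5:
--             first += c
--         if a == P2[r % 8]:
--             second += c
--         if a == P3[r % 10]:
--             third += c
--     best = max(first, second, third)
--     return [j for j, c in enumerate((first, second, third), 1) if c == best]
-- ===== Notes on version B (the rewrite author's own statement) =====
-- stated objective: alternative
-- what changed: Replaces A's single pass of per-index branch cascades with a two-stage algorithm: first aggregate the answers into a histogram keyed by (index mod 40, answer) -- 40 = lcm(5,8,10) determines all three takers' verdicts -- then score each distinct key once weighted by its multiplicity, and take the indices attaining the plain max of the three counts.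
import Mathlib
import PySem

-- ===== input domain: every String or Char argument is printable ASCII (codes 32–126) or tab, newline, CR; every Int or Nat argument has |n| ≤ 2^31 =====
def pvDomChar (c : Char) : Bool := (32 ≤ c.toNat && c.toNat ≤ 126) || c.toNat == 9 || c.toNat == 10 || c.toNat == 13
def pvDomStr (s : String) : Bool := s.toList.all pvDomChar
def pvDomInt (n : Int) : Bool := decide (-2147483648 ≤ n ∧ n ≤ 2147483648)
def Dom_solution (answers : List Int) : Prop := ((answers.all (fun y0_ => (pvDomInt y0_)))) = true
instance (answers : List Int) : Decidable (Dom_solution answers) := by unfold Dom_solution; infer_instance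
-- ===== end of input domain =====

-- B replaces A's single pass of branch cascades with two stages: a histogram keyed by
-- (index mod 40, answer) — 40 = lcm(5,8,10) fixes all three takers' verdicts — then one
-- weighted scoring pass over the distinct keys; objective: alternative, same O(n) cost.

-- ===== PORT A =====
-- A-side helpers: the three `if` blocks of A's loop body, one helper each, branches in
-- A's order (`i % 2` truthiness ported as `mod i 2 ≠ 0`).
def pvFstA (i a s : Int) : Int :=
  if PySem.Int.mod i 5 = PySem.Int.mod a 5 then s + 1 else s

def pvSecA (i a s : Int) : Int :=
  if PySem.Int.mod i 2 ≠ 0 ∧ a = 2 then s + 1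
  else if PySem.Int.mod i 2 = 0 then
    (if PySem.Int.mod (PySem.Int.floordiv i 2) 4 = 1 ∧ a = 1 then s + 1
     else if PySem.Int.mod (PySem.Int.floordiv i 2) 4 = 2 ∧ a = 3 then s + 1
     else if PySem.Int.mod (PySem.Int.floordiv i 2) 4 = 3 ∧ a = 4 then s + 1
     else if PySem.Int.mod (PySem.Int.floordiv i 2) 4 = 0 ∧ a = 5 then s + 1
     else s)
  else s

def pvThdA (i a s : Int) : Int :=
  if (PySem.Int.mod i 10 = 1 ∨ PySem.Int.mod i 10 = 2) ∧ a = 3 then s + 1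
  else if (PySem.Int.mod i 10 = 3 ∨ PySem.Int.mod i 10 = 4) ∧ a = 1 then s + 1
  else if (PySem.Int.mod i 10 = 5 ∨ PySem.Int.mod i 10 = 6) ∧ a = 2 then s + 1
  else if (PySem.Int.mod i 10 = 7 ∨ PySem.Int.mod i 10 = 8) ∧ a = 4 then s + 1
  else if (PySem.Int.mod i 10 = 9 ∨ PySem.Int.mod i 10 = 0) ∧ a = 5 then s + 1
  else s

def pvStepA (answers : List Int) (st : Int × Int × Int) (i : Int) : Int × Int × Int :=
  let a := PySem.List.pyGetD answers (i - 1) 0   -- answers[i-1]; i ∈ range(1, len+1) so always in range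
  (pvFstA i a st.1, pvSecA i a st.2.1, pvThdA i a st.2.2)

-- `max(li)` on a list of int pairs: Python's running max with lexicographic tuple `<`
-- (exact transcription of CPython's max over the nonempty literal list).
def pvMaxLex (hd : Int × Int) (tl : List (Int × Int)) : Int × Int :=
  tl.foldl (fun m p => if m.1 < p.1 ∨ (m.1 = p.1 ∧ m.2 < p.2) then p else m) hd

def solution (answers : List Int) : List Int :=
  let st := (PySem.List.pyRange 1 ((answers.length : Int) + 1) 1).foldl (pvStepA answers) (0, 0, 0)
  let li : List (Int × Int) := [(st.1, 1), (st.2.1, 2), (st.2.2, 3)]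
  let maximum := (pvMaxLex (st.1, 1) [(st.2.1, 2), (st.2.2, 3)]).1
  li.foldl (fun acc p => if p.1 = maximum then acc ++ [p.2] else acc) []

-- ===== PORT B =====
def pvP2 : List Int := [2, 1, 2, 3, 2, 4, 2, 5]
def pvP3 : List Int := [3, 3, 1, 1, 2, 2, 4, 4, 5, 5]

-- stage 2's scoring of one histogram entry ((r, a), c), the three independent `if`s
def pvStepB (st : Int × Int × Int) (p : (Int × Int) × Int) : Int × Int × Int :=
  let r := p.1.1; let a := p.1.2; let c := p.2
  ((if PySem.Int.mod (r + 1) 5 = PySem.Int.mod a 5 then st.1 + c else st.1),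
   (if a = PySem.List.pyGetD pvP2 (PySem.Int.mod r 8) 0 then st.2.1 + c else st.2.1),
   (if a = PySem.List.pyGetD pvP3 (PySem.Int.mod r 10) 0 then st.2.2 + c else st.2.2))

def solution_alt (answers : List Int) : List Int :=
  -- stage 1: hist[(k % 40, a)] = hist.get(key, 0) + 1 over enumerate(answers)
  let hist : PySem.Dict (Int × Int) Int :=
    (PySem.List.enumerate answers 0).foldl
      (fun d p =>
        let key := (PySem.Int.mod p.1 40, p.2)
        d.insert key (d.getD key 0 + 1))
      PySem.Dict.empty
  -- stage 2: score each distinct key once, weighted by its multiplicity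
  let st := hist.items.foldl pvStepB (0, 0, 0)
  let best := max (max st.1 st.2.1) st.2.2
  ((PySem.List.enumerate [st.1, st.2.1, st.2.2] 1).filter (fun p => p.2 == best)).map (·.1)

-- ===== PRECONDITION & SPEC =====
def Spec_solution (answers : List Int) (out : List Int) : Prop := out = solution_alt answers
instance (answers : List Int) (out : List Int) : Decidable (Spec_solution answers out) := by unfold Spec_solution; infer_instance

-- ===== CLAIM (what is proved, stated in full; the proofs are below) =====
def Claim_equal_solution : Prop := ∀ (answers : List Int), Dom_solution answers → Spec_solution answers (solution answers)

-- ===== LEMMAS AND PROOFS =====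

-- the histogram's key list: (k % 40, answers[k]) for k = 0 .. len-1
def pvKeys (answers : List Int) : List (Int × Int) :=
  (PySem.List.enumerate answers 0).map (fun p => (PySem.Int.mod p.1 40, p.2))

-- the three takers' verdicts as Boolean tests on a key (r, a)
def pvQ1 (q : Int × Int) : Bool := PySem.Int.mod (q.1 + 1) 5 == PySem.Int.mod q.2 5
def pvQ2 (q : Int × Int) : Bool := q.2 == PySem.List.pyGetD pvP2 (PySem.Int.mod q.1 8) 0
def pvQ3 (q : Int × Int) : Bool := q.2 == PySem.List.pyGetD pvP3 (PySem.Int.mod q.1 10) 0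

-- reference counts both programs are reduced to
def pvCnt1 (answers : List Int) : Int := ((pvKeys answers).countP pvQ1 : Int)
def pvCnt2 (answers : List Int) : Int := ((pvKeys answers).countP pvQ2 : Int)
def pvCnt3 (answers : List Int) : Int := ((pvKeys answers).countP pvQ3 : Int)

-- A's first-taker test at i = n+1 is pvQ1 at key (n % 40, a).
lemma pvFstA_eq (n a s : Int) :
    pvFstA (n + 1) a s = s + (if pvQ1 (PySem.Int.mod n 40, a) = true then 1 else 0) := by
  unfold pvFstA pvQ1
  have h5 : PySem.Int.mod (n + 1) 5 = (n + 1) % 5 := PySem.Int.mod_eq_emod_of_pos (by norm_num)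
  have h40 : PySem.Int.mod n 40 = n % 40 := PySem.Int.mod_eq_emod_of_pos (by norm_num)
  have h5' : PySem.Int.mod (n % 40 + 1) 5 = (n % 40 + 1) % 5 := PySem.Int.mod_eq_emod_of_pos (by norm_num)
  simp only [h5, h40, h5', beq_iff_eq]
  have : (n % 40 + 1) % 5 = (n + 1) % 5 := by omega
  rw [this]
  split_ifs <;> omega

-- A's second-taker branch cascade at i = n+1 is pvQ2 at key (n % 40, a).
lemma pvSecA_eq (n a s : Int) :
    pvSecA (n + 1) a s = s + (if pvQ2 (PySem.Int.mod n 40, a) = true then 1 else 0) := by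
  unfold pvSecA pvQ2
  have h2 : PySem.Int.mod (n + 1) 2 = (n + 1) % 2 := PySem.Int.mod_eq_emod_of_pos (by norm_num)
  have h4 : PySem.Int.mod (PySem.Int.floordiv (n + 1) 2) 4 = ((n + 1) / 2) % 4 := by
    rw [PySem.Int.floordiv_eq_ediv_of_pos (by norm_num)]
    exact PySem.Int.mod_eq_emod_of_pos (by norm_num)
  have h40 : PySem.Int.mod n 40 = n % 40 := PySem.Int.mod_eq_emod_of_pos (by norm_num)
  have h8 : PySem.Int.mod (n % 40) 8 = n % 8 := by
    rw [PySem.Int.mod_eq_emod_of_pos (by norm_num : (0:Int) < 8)]; omega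
  simp only [h2, h4, h40, h8, beq_iff_eq]
  rcases (by omega : n % 8 = 0 ∨ n % 8 = 1 ∨ n % 8 = 2 ∨ n % 8 = 3 ∨
      n % 8 = 4 ∨ n % 8 = 5 ∨ n % 8 = 6 ∨ n % 8 = 7) with
    hr | hr | hr | hr | hr | hr | hr | hr <;>
    rw [hr] <;>
    [rw [(by decide : PySem.List.pyGetD pvP2 (0 : Int) 0 = 2)];
     rw [(by decide : PySem.List.pyGetD pvP2 (1 : Int) 0 = 1)];
     rw [(by decide : PySem.List.pyGetD pvP2 (2 : Int) 0 = 2)];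
     rw [(by decide : PySem.List.pyGetD pvP2 (3 : Int) 0 = 3)];
     rw [(by decide : PySem.List.pyGetD pvP2 (4 : Int) 0 = 2)];
     rw [(by decide : PySem.List.pyGetD pvP2 (5 : Int) 0 = 4)];
     rw [(by decide : PySem.List.pyGetD pvP2 (6 : Int) 0 = 2)];
     rw [(by decide : PySem.List.pyGetD pvP2 (7 : Int) 0 = 5)]] <;>
    split_ifs <;> omega

-- A's third-taker branch cascade at i = n+1 is pvQ3 at key (n % 40, a).
lemma pvThdA_eq (n a s : Int) :
    pvThdA (n + 1) a s = s + (if pvQ3 (PySem.Int.mod n 40, a) = true then 1 else 0) := by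
  unfold pvThdA pvQ3
  have hm : PySem.Int.mod (n + 1) 10 = (n + 1) % 10 := PySem.Int.mod_eq_emod_of_pos (by norm_num)
  have h40 : PySem.Int.mod n 40 = n % 40 := PySem.Int.mod_eq_emod_of_pos (by norm_num)
  have h10 : PySem.Int.mod (n % 40) 10 = n % 10 := by
    rw [PySem.Int.mod_eq_emod_of_pos (by norm_num : (0:Int) < 10)]; omega
  simp only [hm, h40, h10, beq_iff_eq]
  rcases (by omega : n % 10 = 0 ∨ n % 10 = 1 ∨ n % 10 = 2 ∨ n % 10 = 3 ∨ n % 10 = 4 ∨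
      n % 10 = 5 ∨ n % 10 = 6 ∨ n % 10 = 7 ∨ n % 10 = 8 ∨ n % 10 = 9) with
    hr | hr | hr | hr | hr | hr | hr | hr | hr | hr <;>
    rw [hr] <;>
    [rw [(by decide : PySem.List.pyGetD pvP3 (0 : Int) 0 = 3)];
     rw [(by decide : PySem.List.pyGetD pvP3 (1 : Int) 0 = 3)];
     rw [(by decide : PySem.List.pyGetD pvP3 (2 : Int) 0 = 1)];
     rw [(by decide : PySem.List.pyGetD pvP3 (3 : Int) 0 = 1)];
     rw [(by decide : PySem.List.pyGetD pvP3 (4 : Int) 0 = 2)];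
     rw [(by decide : PySem.List.pyGetD pvP3 (5 : Int) 0 = 2)];
     rw [(by decide : PySem.List.pyGetD pvP3 (6 : Int) 0 = 4)];
     rw [(by decide : PySem.List.pyGetD pvP3 (7 : Int) 0 = 4)];
     rw [(by decide : PySem.List.pyGetD pvP3 (8 : Int) 0 = 5)];
     rw [(by decide : PySem.List.pyGetD pvP3 (9 : Int) 0 = 5)]] <;>
    split_ifs <;> omega

-- pvKeys grows by one key when one answer is appended
lemma pvKeys_append (xs : List Int) (x : Int) :
    pvKeys (xs ++ [x]) = pvKeys xs ++ [(PySem.Int.mod (xs.length : Int) 40, x)] := by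
  unfold pvKeys
  rw [PySem.List.enumerate_append]
  simp [PySem.List.enumerate_cons, PySem.List.enumerate_nil]

-- each reference count grows by the new key's verdict
lemma pvCnt1_append (xs : List Int) (x : Int) :
    pvCnt1 (xs ++ [x]) =
      pvCnt1 xs + (if pvQ1 (PySem.Int.mod (xs.length : Int) 40, x) = true then 1 else 0) := by
  unfold pvCnt1
  rw [pvKeys_append, List.countP_append]
  simp only [List.countP_cons, List.countP_nil]
  split_ifs <;> push_cast <;> omega

lemma pvCnt2_append (xs : List Int) (x : Int) :
    pvCnt2 (xs ++ [x]) =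
      pvCnt2 xs + (if pvQ2 (PySem.Int.mod (xs.length : Int) 40, x) = true then 1 else 0) := by
  unfold pvCnt2
  rw [pvKeys_append, List.countP_append]
  simp only [List.countP_cons, List.countP_nil]
  split_ifs <;> push_cast <;> omega

lemma pvCnt3_append (xs : List Int) (x : Int) :
    pvCnt3 (xs ++ [x]) =
      pvCnt3 xs + (if pvQ3 (PySem.Int.mod (xs.length : Int) 40, x) = true then 1 else 0) := by
  unfold pvCnt3
  rw [pvKeys_append, List.countP_append]
  simp only [List.countP_cons, List.countP_nil]
  split_ifs <;> push_cast <;> omega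

-- A's loop state after the whole range equals the three reference counts.
lemma pvFold_eq (answers : List Int) :
    (PySem.List.pyRange 1 ((answers.length : Int) + 1) 1).foldl (pvStepA answers) (0, 0, 0) =
      (pvCnt1 answers, pvCnt2 answers, pvCnt3 answers) := by
  induction answers using List.reverseRecOn with
  | nil =>
      simp [PySem.List.pyRange_one_eq_nil, pvCnt1, pvCnt2, pvCnt3, pvKeys,
        PySem.List.enumerate]
  | append_singleton xs x ih =>
      have hlen : ((xs ++ [x]).length : Int) = (xs.length : Int) + 1 := by simp
      rw [hlen,
          PySem.List.pyRange_one_succ_right (a := 1) (b := (xs.length : Int) + 1) (by omega),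
          List.foldl_append]
      have hcongr :
          (PySem.List.pyRange 1 ((xs.length : Int) + 1) 1).foldl (pvStepA (xs ++ [x])) (0, 0, 0) =
          (PySem.List.pyRange 1 ((xs.length : Int) + 1) 1).foldl (pvStepA xs) (0, 0, 0) := by
        apply PySem.List.foldl_congr_mem
        intro acc i hi
        rw [PySem.List.mem_pyRange_one] at hi
        unfold pvStepA
        have hget : PySem.List.pyGetD (xs ++ [x]) (i - 1) 0 = PySem.List.pyGetD xs (i - 1) 0 := by
          rw [PySem.List.pyGetD_eq_getElem (xs ++ [x]) 0 (by omega) (by rw [hlen]; omega),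
              PySem.List.pyGetD_eq_getElem xs 0 (by omega) (by omega)]
          exact List.getElem_append_left (by omega)
        rw [hget]
      rw [hcongr, ih]
      simp only [List.foldl_cons, List.foldl_nil, pvStepA]
      have hx : PySem.List.pyGetD (xs ++ [x]) ((xs.length : Int) + 1 - 1) 0 = x := by
        have hk' : (xs.length : Int) + 1 - 1 = (xs.length : Int) := by ring
        rw [hk', PySem.List.pyGetD_natCast]
        simp
      rw [hx, pvFstA_eq, pvSecA_eq, pvThdA_eq, pvCnt1_append, pvCnt2_append, pvCnt3_append]

-- sum over a nodup list of an indicator of one of its members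
lemma pvSumIndicator {α : Type} [BEq α] [LawfulBEq α] (d : List α) (hnd : d.Nodup)
    (x : α) (hx : x ∈ d) (P : α → Bool) :
    (d.map (fun k => if P k = true then (if x == k then (1 : Int) else 0) else 0)).sum =
      if P x = true then 1 else 0 := by
  induction d with
  | nil => cases hx
  | cons y t ih =>
      simp only [List.map_cons, List.sum_cons]
      rcases List.mem_cons.mp hx with h | h
      · subst h
        have hnx : x ∉ t := (List.nodup_cons.mp hnd).1
        have hz : (t.map (fun k => if P k = true then (if x == k then (1 : Int) else 0) else 0)).sum = 0 := by
          rw [List.sum_eq_zero]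
          intro w hw
          rcases List.mem_map.mp hw with ⟨k, hk, rfl⟩
          have hne : x ≠ k := fun h => hnx (h ▸ hk)
          simp [beq_eq_false_iff_ne.mpr hne]
        rw [hz]
        simp
      · have hxy : x ≠ y := by
          rintro rfl; exact (List.nodup_cons.mp hnd).1 h
        rw [ih (List.nodup_cons.mp hnd).2 h]
        simp [beq_eq_false_iff_ne.mpr hxy]

-- weighted sum over the distinct keys = plain count over the key list
lemma pvSumCount {α : Type} [BEq α] [LawfulBEq α] (d : List α) (hnd : d.Nodup)
    (l : List α) (hmem : ∀ x ∈ l, x ∈ d) (P : α → Bool) :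
    (d.map (fun k => if P k = true then (l.count k : Int) else 0)).sum = (l.countP P : Int) := by
  induction l with
  | nil => simp
  | cons x t ih =>
      have hx : x ∈ d := hmem x List.mem_cons_self
      have hmem' : ∀ y ∈ t, y ∈ d := fun y hy => hmem y (List.mem_cons_of_mem _ hy)
      have hfun : d.map (fun k => if P k = true then ((x :: t).count k : Int) else 0) =
          d.map (fun k => (if P k = true then (t.count k : Int) else 0) +
            (if P k = true then (if x == k then (1 : Int) else 0) else 0)) := by
        apply List.map_congr_left
        intro k _
        rw [List.count_cons]
        split_ifs <;> push_cast <;> simp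
      rw [hfun, PySem.List.sum_map_add_int, ih hmem', pvSumIndicator d hnd x hx P,
        List.countP_cons]
      split_ifs <;> push_cast <;> omega

-- B's histogram fold is the counter of pvKeys
lemma pvHist_eq (answers : List Int) :
    (PySem.List.enumerate answers 0).foldl
      (fun d p =>
        let key := (PySem.Int.mod p.1 40, p.2)
        d.insert key (d.getD key 0 + 1))
      PySem.Dict.empty = PySem.Dict.counter (pvKeys answers) := by
  rw [← PySem.Dict.foldl_insert_getD_add_one_eq_counter]
  unfold pvKeys
  rw [List.foldl_map]

-- one scoring accumulator over the counter's items = the matching reference count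
lemma pvFoldAddQ (answers : List Int) (Q : Int × Int → Bool) (a : Int) :
    ((PySem.Set.ofList (pvKeys answers)).map
        (fun k => (k, ((pvKeys answers).count k : Int)))).foldl
      (fun s p => if Q p.1 = true then s + p.2 else s) a =
      a + ((pvKeys answers).countP Q : Int) := by
  rw [List.foldl_map]
  dsimp only
  refine Eq.trans (PySem.List.foldl_congr_mem (PySem.Set.ofList (pvKeys answers)) _
      (fun s k => s + (if Q k = true then ((pvKeys answers).count k : Int) else 0)) a ?_) ?_
  · intro s k _
    dsimp only
    split_ifs <;> omega
  · rw [PySem.List.foldl_add,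
      pvSumCount (PySem.Set.ofList (pvKeys answers)) (PySem.Set.nodup_ofList _)
        (pvKeys answers) (fun x hx => (PySem.Set.mem_ofList _ _).mpr hx) Q]

-- the three-accumulator scoring fold splits into three independent folds
lemma pvStepB_split (L : List ((Int × Int) × Int)) (a b c : Int) :
    L.foldl pvStepB (a, b, c) =
      (L.foldl (fun s p => if pvQ1 p.1 = true then s + p.2 else s) a,
       L.foldl (fun s p => if pvQ2 p.1 = true then s + p.2 else s) b,
       L.foldl (fun s p => if pvQ3 p.1 = true then s + p.2 else s) c) := by
  induction L generalizing a b c with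
  | nil => rfl
  | cons q t ih =>
      simp only [List.foldl_cons]
      rw [show pvStepB (a, b, c) q =
          ((if pvQ1 q.1 = true then a + q.2 else a),
           (if pvQ2 q.1 = true then b + q.2 else b),
           (if pvQ3 q.1 = true then c + q.2 else c)) from by
        simp only [pvStepB, pvQ1, pvQ2, pvQ3, beq_iff_eq]]
      exact ih _ _ _

-- B's scoring fold over the histogram items equals the three reference counts
lemma pvScore_eq (answers : List Int) :
    (PySem.Dict.counter (pvKeys answers)).items.foldl pvStepB (0, 0, 0) =
      (pvCnt1 answers, pvCnt2 answers, pvCnt3 answers) := by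
  rw [PySem.Dict.items_counter, pvStepB_split, pvFoldAddQ, pvFoldAddQ, pvFoldAddQ]
  unfold pvCnt1 pvCnt2 pvCnt3
  simp

-- the first component of Python's lexicographic max over A's pair list is the plain max of the counts
lemma pvMaxLex_fst (f s t : Int) :
    (pvMaxLex (f, 1) [(s, 2), (t, 3)]).1 = max (max f s) t := by
  unfold pvMaxLex
  simp only [List.foldl_cons, List.foldl_nil]
  split_ifs <;> simp_all [max_def] <;> omega

-- A's select-by-max foldl over the pair list equals B's filter/map over enumerate
lemma pvSelect_eq (c1 c2 c3 : Int) :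
    ([((c1 : Int), (1 : Int)), (c2, 2), (c3, 3)].foldl
      (fun acc p => if p.1 = max (max c1 c2) c3 then acc ++ [p.2] else acc) []) =
    ((PySem.List.enumerate [c1, c2, c3] 1).filter
      (fun p => p.2 == max (max c1 c2) c3)).map (·.1) := by
  simp only [PySem.List.enumerate_cons, PySem.List.enumerate_nil, List.filter_cons,
    List.filter_nil, List.foldl_cons, List.foldl_nil,
    List.nil_append, beq_iff_eq]
  split_ifs <;> rfl

-- ===== VERDICT (by name: the statement is the Claim_ definition above) =====
theorem solution_spec : Claim_equal_solution := by
  intro answers _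
  unfold Spec_solution solution solution_alt
  rw [pvFold_eq, pvHist_eq]
  dsimp only
  rw [pvScore_eq]
  dsimp only
  rw [pvMaxLex_fst]
  exact pvSelect_eq (pvCnt1 answers) (pvCnt2 answers) (pvCnt3 answers)
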